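-- pv_equiv track=rewrite | github.com/fuguigui/AdventOfCode | Day3/day3.py | find_do_snippets
-- ===== SOURCE A (Python) =====
-- def find_do_snippets(input):
--     default_prefix_input = "do()" + input
--     snippets = default_prefix_input.split("don\'t")
--     do_snippets = []
--     for snippet in snippets:
--         do_snippet = snippet.split("do()")
--         if len(do_snippet) == 1:
--             continue
--         do_snippets.extend(do_snippet[1:])
--     return do_snippets
-- ===== SOURCE B (Python) =====
-- def find_do_snippets(input):
--     s = "do()" + input
--     out = []
--     gap = []
--     last_was_do = False
--     i = 0
--     n = len(s)
--     while i < n: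
--         if s.startswith("do()", i):
--             if last_was_do:
--                 out.append("".join(gap))
--             gap = []
--             last_was_do = True
--             i += 4
--         elif s.startswith("don't", i):
--             if last_was_do:
--                 out.append("".join(gap))
--             gap = []
--             last_was_do = False
--             i += 5
--         else:
--             gap.append(s[i])
--             i += 1
--     if last_was_do:
--         out.append("".join(gap))
--     return out
-- ===== Notes on version B (the rewrite author's own statement) =====
-- stated objective: alternative
-- what changed: Replaced A's two-level split("don't")/split("do()")-and-extend passes with a single left-to-right state-machine scan that flushes each gap when it hits a marker, keeping it only if the previous marker was "do()".
import Mathlib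
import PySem

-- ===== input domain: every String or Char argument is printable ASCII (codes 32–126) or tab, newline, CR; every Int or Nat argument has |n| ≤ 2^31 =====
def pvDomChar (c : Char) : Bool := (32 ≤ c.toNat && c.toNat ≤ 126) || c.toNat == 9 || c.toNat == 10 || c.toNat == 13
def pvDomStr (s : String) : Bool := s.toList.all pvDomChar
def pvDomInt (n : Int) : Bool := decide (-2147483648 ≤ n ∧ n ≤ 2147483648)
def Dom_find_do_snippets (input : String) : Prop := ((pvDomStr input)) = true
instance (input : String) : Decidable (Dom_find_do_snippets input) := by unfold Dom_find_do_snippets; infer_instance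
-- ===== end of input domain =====

-- B replaces A's nested split("don't")/split("do()") passes with a single-pass
-- state-machine scan over the markers (objective: alternative; same result, same order).


-- ===== PORT A =====
def find_do_snippets (input : String) : List String :=
  let default_prefix_input := "do()" ++ input
  let snippets := (PySem.Str.split? default_prefix_input "don't").getD []
  let do_snippets := snippets.foldl (fun acc snippet =>
      let do_snippet := (PySem.Str.split? snippet "do()").getD []
      if do_snippet.length = 1 then acc else acc ++ do_snippet.drop 1) ([] : List String)
  do_snippets

-- ===== PORT B =====
-- state machine of Source B: walk the characters; on "do()" / "don't" flush the gap
-- (kept only if the previous marker was "do()"); the index i becomes the remaining suffix.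
def altGo (s : List Char) (lastDo : Bool) (gap : List Char) (out : List String) : List String :=
  if _h1 : ("do()".toList).isPrefixOf s then
    altGo (s.drop 4) true [] (if lastDo then out ++ [String.ofList gap] else out)
  else if _h2 : ("don't".toList).isPrefixOf s then
    altGo (s.drop 5) false [] (if lastDo then out ++ [String.ofList gap] else out)
  else
    match s with
    | [] => if lastDo then out ++ [String.ofList gap] else out
    | c :: rest => altGo rest lastDo (gap ++ [c]) out
termination_by s.length
decreasing_by
  · have := (List.isPrefixOf_iff_prefix.mp _h1).length_le
    simp at this ⊢; omega
  · have := (List.isPrefixOf_iff_prefix.mp _h2).length_le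
    simp at this ⊢; omega
  · simp

def find_do_snippets_alt (input : String) : List String :=
  altGo (("do()" ++ input).toList) false [] []

-- ===== PRECONDITION & SPEC =====
def Spec_find_do_snippets (input : String) (out : List String) : Prop := out = find_do_snippets_alt input
instance (input : String) (out : List String) : Decidable (Spec_find_do_snippets input out) := by unfold Spec_find_do_snippets; infer_instance

-- ===== CLAIM (what is proved, stated in full; the proofs are below) =====
def Claim_equal_find_do_snippets : Prop := ∀ (input : String), Dom_find_do_snippets input → Spec_find_do_snippets input (find_do_snippets input)

-- ===== LEMMAS AND PROOFS =====

-- clean recursive characterisation of Python's str.split(sep) (sep ≠ "")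
def splitSpec (sep : List Char) (s : List Char) : List (List Char) :=
  if _h : sep ≠ [] ∧ sep.isPrefixOf s then [] :: splitSpec sep (s.drop sep.length)
  else
    match s with
    | [] => [[]]
    | c :: r => (splitSpec sep r).modifyHead (c :: ·)
termination_by s.length
decreasing_by
  · rcases _h with ⟨hne, hp⟩
    have h1 := (List.isPrefixOf_iff_prefix.mp hp).length_le
    have h2 : 0 < sep.length := List.length_pos_iff.mpr hne
    simp only [List.length_drop]
    omega
  · simp

-- the characters of s before its first "do()"/"don't" marker (all of s if none)
def preSeg (s : List Char) : List Char :=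
  if ("do()".toList).isPrefixOf s then []
  else if ("don't".toList).isPrefixOf s then []
  else
    match s with
    | [] => []
    | c :: r => c :: preSeg r

-- the char-level content of A's computation
def acSnips (s : List Char) : List (List Char) :=
  (splitSpec ['d','o','n','\'','t'] s).flatMap (fun seg => (splitSpec ['d','o','(',')'] seg).drop 1)

-- ---- equations for splitSpec / preSeg / altGo ----

lemma doList : "do()".toList = ['d','o','(',')'] := rfl
lemma dontList : "don't".toList = ['d','o','n','\'','t'] := rfl

lemma splitSpec_nil (sep : List Char) (hne : sep ≠ []) : splitSpec sep [] = [[]] := by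
  rw [splitSpec]
  cases sep with
  | nil => simp at hne
  | cons a l => simp

lemma splitSpec_pre (sep s : List Char) (hne : sep ≠ []) (hp : sep <+: s) :
    splitSpec sep s = [] :: splitSpec sep (s.drop sep.length) := by
  rw [splitSpec]; simp [hne, hp]

lemma splitSpec_cons (sep : List Char) (c : Char) (r : List Char)
    (hnp : ¬ sep <+: (c :: r)) :
    splitSpec sep (c :: r) = (splitSpec sep r).modifyHead (c :: ·) := by
  rw [splitSpec]; simp [hnp]

lemma splitSpec_ne_nil (sep s : List Char) : splitSpec sep s ≠ [] := by
  fun_induction splitSpec sep s <;> simp_all [List.modifyHead_eq_nil_iff]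

lemma drop_one_modifyHead {α : Type} (f : α → α) (l : List α) :
    (l.modifyHead f).drop 1 = l.drop 1 := by cases l <;> simp

lemma headI_modifyHead (f : List Char → List Char) (l : List (List Char)) (h : l ≠ []) :
    (l.modifyHead f).headI = f l.headI := by cases l <;> simp_all

lemma modifyHead_fun_id (l : List (List Char)) : l.modifyHead (fun x => x) = l := by
  cases l <;> simp

-- PySem.Chars.splitOn agrees with splitSpec
lemma go_eq (sep : List Char) (hne : sep ≠ []) :
    ∀ (fuel : Nat) (l cur : List Char) (acc : List (List Char)), l.length < fuel →
    PySem.Chars.splitOn.go sep fuel l cur acc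
      = acc.reverse ++ (splitSpec sep l).modifyHead (cur.reverse ++ ·) := by
  intro fuel
  induction fuel with
  | zero => intro l cur acc h; omega
  | succ fuel IH =>
    intro l cur acc h
    cases l with
    | nil =>
      rw [show PySem.Chars.splitOn.go sep (fuel+1) [] cur acc = (cur.reverse :: acc).reverse from rfl,
          splitSpec_nil sep hne]
      simp
    | cons c rest =>
      rw [show PySem.Chars.splitOn.go sep (fuel+1) (c::rest) cur acc =
          (if sep.isPrefixOf (c::rest) = true then
            PySem.Chars.splitOn.go sep fuel (List.drop sep.length (c::rest)) [] (cur.reverse :: acc)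
          else PySem.Chars.splitOn.go sep fuel rest (c :: cur) acc) from rfl]
      have hsl : 0 < sep.length := List.length_pos_iff.mpr hne
      split_ifs with hp
      · rw [IH _ _ _ (by simp at h ⊢; omega),
            splitSpec_pre sep _ hne (List.isPrefixOf_iff_prefix.mp hp)]
        simp [modifyHead_fun_id]
      · have hnp : ¬ sep <+: (c :: rest) := by
          intro hc; exact hp (List.isPrefixOf_iff_prefix.mpr hc)
        rw [IH _ _ _ (by simp at h; omega),
            splitSpec_cons sep c rest hnp, List.modifyHead_modifyHead]
        congr 2
        funext x
        simp

lemma splitOn_eq (s sep : List Char) (hne : sep ≠ []) :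
    PySem.Chars.splitOn s sep = splitSpec sep s := by
  unfold PySem.Chars.splitOn
  rw [go_eq sep hne _ _ _ _ (by omega)]
  simp [modifyHead_fun_id]

lemma preSeg_do (s : List Char) (h : ['d','o','(',')'] <+: s) : preSeg s = [] := by
  obtain ⟨t, rfl⟩ := h
  rw [preSeg.eq_def]; simp [doList]

lemma preSeg_dont (s : List Char) (h : ['d','o','n','\'','t'] <+: s) : preSeg s = [] := by
  obtain ⟨t, rfl⟩ := h
  rw [preSeg.eq_def]
  split_ifs with h1 h2
  · rfl
  · rfl
  · exact absurd (by simp [dontList]) h2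

lemma preSeg_nil : preSeg [] = [] := by rw [preSeg.eq_def]; simp

lemma preSeg_cons (c : Char) (r : List Char)
    (h1 : ¬ ['d','o','(',')'] <+: (c :: r))
    (h2 : ¬ ['d','o','n','\'','t'] <+: (c :: r)) :
    preSeg (c :: r) = c :: preSeg r := by
  rw [preSeg.eq_def]; simp [doList, dontList, h1, h2]

lemma altGo_do_t (s : List Char) (gap : List Char) (out : List String)
    (h : ['d','o','(',')'] <+: s) :
    altGo s true gap out = altGo (s.drop 4) true [] (out ++ [String.ofList gap]) := by
  obtain ⟨t, rfl⟩ := h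
  rw [altGo]; simp [doList]

lemma altGo_do_f (s : List Char) (gap : List Char) (out : List String)
    (h : ['d','o','(',')'] <+: s) :
    altGo s false gap out = altGo (s.drop 4) true [] out := by
  obtain ⟨t, rfl⟩ := h
  rw [altGo]; simp [doList]

lemma altGo_dont_t (s : List Char) (gap : List Char) (out : List String)
    (h1 : ¬ ['d','o','(',')'] <+: s) (h2 : ['d','o','n','\'','t'] <+: s) :
    altGo s true gap out = altGo (s.drop 5) false [] (out ++ [String.ofList gap]) := by
  obtain ⟨t, rfl⟩ := h2
  rw [altGo]; simp [doList, dontList]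

lemma altGo_dont_f (s : List Char) (gap : List Char) (out : List String)
    (h1 : ¬ ['d','o','(',')'] <+: s) (h2 : ['d','o','n','\'','t'] <+: s) :
    altGo s false gap out = altGo (s.drop 5) false [] out := by
  obtain ⟨t, rfl⟩ := h2
  rw [altGo]; simp [doList, dontList]

lemma altGo_nil (b : Bool) (gap : List Char) (out : List String) :
    altGo [] b gap out = if b then out ++ [String.ofList gap] else out := by
  rw [altGo]; simp [doList, dontList]

lemma altGo_cons (c : Char) (r : List Char) (b : Bool) (gap : List Char) (out : List String)
    (h1 : ¬ ['d','o','(',')'] <+: (c :: r))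
    (h2 : ¬ ['d','o','n','\'','t'] <+: (c :: r)) :
    altGo (c :: r) b gap out = altGo r b (gap ++ [c]) out := by
  rw [altGo]; simp [doList, dontList, h1, h2]

-- the accumulator/state characterisation of the scan
lemma altGo_state (n : Nat) : ∀ (s : List Char), s.length ≤ n → ∀ (gap : List Char) (out : List String),
    altGo s false gap out = out ++ altGo s false [] [] ∧
    altGo s true gap out = out ++ String.ofList (gap ++ preSeg s) :: altGo s false [] [] := by
  induction n with
  | zero =>
    intro s hs gap out
    have : s = [] := by cases s <;> simp_all
    subst this
    simp [altGo_nil, preSeg_nil]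
  | succ n IH =>
    intro s hs gap out
    by_cases hDO : ['d','o','(',')'] <+: s
    · have hlen : 4 ≤ s.length := by simpa using hDO.length_le
      have hd : (s.drop 4).length ≤ n := by simp; omega
      constructor
      · rw [altGo_do_f s gap out hDO, altGo_do_f s [] [] hDO,
            (IH _ hd [] out).2, (IH _ hd [] []).2]
        simp
      · rw [altGo_do_t s gap out hDO, altGo_do_f s [] [] hDO,
            (IH _ hd [] (out ++ [String.ofList gap])).2, (IH _ hd [] []).2,
            preSeg_do s hDO]
        simp
    · by_cases hDONT : ['d','o','n','\'','t'] <+: s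
      · have hlen : 5 ≤ s.length := by simpa using hDONT.length_le
        have hd : (s.drop 5).length ≤ n := by simp; omega
        constructor
        · rw [altGo_dont_f s gap out hDO hDONT, altGo_dont_f s [] [] hDO hDONT,
              (IH _ hd [] out).1, (IH _ hd [] []).1]
        · rw [altGo_dont_t s gap out hDO hDONT, altGo_dont_f s [] [] hDO hDONT,
              (IH _ hd [] (out ++ [String.ofList gap])).1]
          simp [preSeg_dont s hDONT]
      · cases s with
        | nil => simp [altGo_nil, preSeg_nil]
        | cons c r =>
          have hr : r.length ≤ n := by simp at hs; omega
          constructor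
          · rw [altGo_cons c r false gap out hDO hDONT, altGo_cons c r false [] [] hDO hDONT,
                (IH _ hr (gap ++ [c]) out).1]
            simp [(IH _ hr [c] []).1]
          · rw [altGo_cons c r true gap out hDO hDONT, preSeg_cons c r hDO hDONT,
                (IH _ hr (gap ++ [c]) out).2, altGo_cons c r false [] [] hDO hDONT]
            simp [(IH _ hr [c] []).1]

-- head of the "don't"-split is a prefix of the string
lemma headI_splitDont_prefix (n : Nat) : ∀ s : List Char, s.length ≤ n →
    ((splitSpec ['d','o','n','\'','t'] s).headI) <+: s := by
  induction n with
  | zero =>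
    intro s hs
    have : s = [] := by cases s <;> simp_all
    subst this
    rw [splitSpec_nil _ (by simp)]
    simp
  | succ n IH =>
    intro s hs
    by_cases hp : ['d','o','n','\'','t'] <+: s
    · rw [splitSpec_pre _ _ (by simp) hp]
      simp
    · cases s with
      | nil => rw [splitSpec_nil _ (by simp)]; simp
      | cons c r =>
        rw [splitSpec_cons _ _ _ hp, headI_modifyHead _ _ (splitSpec_ne_nil _ _)]
        have hr : r.length ≤ n := by simp at hs; omega
        simp only [List.cons_prefix_cons]
        exact ⟨trivial, IH r hr⟩

lemma not_do_prefix_head (c : Char) (r : List Char)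
    (h : ¬ ['d','o','(',')'] <+: (c :: r)) :
    ¬ ['d','o','(',')'] <+: (c :: (splitSpec ['d','o','n','\'','t'] r).headI) := by
  intro hc
  apply h
  apply hc.trans
  simp only [List.cons_prefix_cons]
  exact ⟨trivial, headI_splitDont_prefix r.length r le_rfl⟩

lemma splitDont_doPrefix (r : List Char) :
    splitSpec ['d','o','n','\'','t'] ('d'::'o'::'('::')'::r)
      = (splitSpec ['d','o','n','\'','t'] r).modifyHead (fun x => 'd'::'o'::'('::')'::x) := by
  rw [splitSpec_cons _ _ _ (by simp [List.cons_prefix_cons]),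
      splitSpec_cons _ _ _ (by simp [List.cons_prefix_cons]),
      splitSpec_cons _ _ _ (by simp [List.cons_prefix_cons]),
      splitSpec_cons _ _ _ (by simp [List.cons_prefix_cons]),
      List.modifyHead_modifyHead, List.modifyHead_modifyHead, List.modifyHead_modifyHead]
  rfl

lemma splitSpec_do_pre (x : List Char) :
    splitSpec ['d','o','(',')'] ('d'::'o'::'('::')'::x) = [] :: splitSpec ['d','o','(',')'] x := by
  have := splitSpec_pre ['d','o','(',')'] (['d','o','(',')'] ++ x) (by simp) (List.prefix_append _ _)
  simpa using this

lemma splitSpec_dont_pre (x : List Char) :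
    splitSpec ['d','o','n','\'','t'] ('d'::'o'::'n'::'\''::'t'::x) = [] :: splitSpec ['d','o','n','\'','t'] x := by
  have := splitSpec_pre ['d','o','n','\'','t'] (['d','o','n','\'','t'] ++ x) (by simp) (List.prefix_append _ _)
  simpa using this

lemma altGo_do_cons (x : List Char) :
    altGo ('d'::'o'::'('::')'::x) false [] [] = altGo x true [] [] := by
  have := altGo_do_f (['d','o','(',')'] ++ x) [] [] (List.prefix_append _ _)
  simpa using this

lemma altGo_dont_cons (x : List Char) :
    altGo ('d'::'o'::'n'::'\''::'t'::x) false [] [] = altGo x false [] [] := by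
  have := altGo_dont_f (['d','o','n','\'','t'] ++ x) [] []
    (by simp [List.cons_prefix_cons]) (List.prefix_append _ _)
  simpa using this

-- head of the inner "do()"-split of the head segment is exactly preSeg
lemma headI_do_headI (n : Nat) : ∀ s : List Char, s.length ≤ n →
    (splitSpec ['d','o','(',')'] ((splitSpec ['d','o','n','\'','t'] s).headI)).headI = preSeg s := by
  induction n with
  | zero =>
    intro s hs
    have : s = [] := by cases s <;> simp_all
    subst this
    rw [splitSpec_nil _ (by simp)]
    simp only [List.headI_cons]
    rw [splitSpec_nil _ (by simp), preSeg_nil]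
    rfl
  | succ n IH =>
    intro s hs
    by_cases hDO : ['d','o','(',')'] <+: s
    · obtain ⟨r, rfl⟩ := hDO
      simp only [List.cons_append, List.nil_append]
      rw [splitDont_doPrefix, headI_modifyHead _ _ (splitSpec_ne_nil _ _),
          splitSpec_do_pre, preSeg_do ('d'::'o'::'('::')'::r) ⟨r, rfl⟩]
      rfl
    · by_cases hDONT : ['d','o','n','\'','t'] <+: s
      · rw [splitSpec_pre _ _ (by simp) hDONT]
        simp only [List.headI_cons]
        rw [splitSpec_nil _ (by simp), preSeg_dont _ hDONT]
        rfl
      · cases s with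
        | nil =>
          rw [splitSpec_nil _ (by simp)]
          simp only [List.headI_cons]
          rw [splitSpec_nil _ (by simp), preSeg_nil]
          rfl
        | cons c r =>
          have hr : r.length ≤ n := by simp at hs; omega
          rw [splitSpec_cons _ _ _ hDONT, headI_modifyHead _ _ (splitSpec_ne_nil _ _),
              splitSpec_cons _ _ _ (not_do_prefix_head c r hDO),
              headI_modifyHead _ _ (splitSpec_ne_nil _ _), IH r hr,
              preSeg_cons c r hDO hDONT]

-- main lemma: A's nested-split result equals B's scan
lemma acSnips_main (n : Nat) : ∀ s : List Char, s.length ≤ n →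
    (acSnips s).map String.ofList = altGo s false [] [] := by
  induction n with
  | zero =>
    intro s hs
    have : s = [] := by cases s <;> simp_all
    subst this
    unfold acSnips
    rw [splitSpec_nil _ (by simp)]
    simp [splitSpec_nil _ (by simp : (['d','o','(',')'] : List Char) ≠ []), altGo_nil]
  | succ n IH =>
    intro s hs
    by_cases hDO : ['d','o','(',')'] <+: s
    · obtain ⟨r, rfl⟩ := hDO
      simp only [List.cons_append, List.nil_append] at hs ⊢
      have hr : r.length ≤ n := by simp at hs; omega
      obtain ⟨h', t, hsplit⟩ : ∃ h' t, splitSpec ['d','o','n','\'','t'] r = h' :: t := by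
        cases hx : splitSpec ['d','o','n','\'','t'] r with
        | nil => exact absurd hx (splitSpec_ne_nil _ _)
        | cons a b => exact ⟨a, b, rfl⟩
      obtain ⟨p0, ps, hps⟩ : ∃ p0 ps, splitSpec ['d','o','(',')'] h' = p0 :: ps := by
        cases hx : splitSpec ['d','o','(',')'] h' with
        | nil => exact absurd hx (splitSpec_ne_nil _ _)
        | cons a b => exact ⟨a, b, rfl⟩
      have hp0 : p0 = preSeg r := by
        have hk := headI_do_headI r.length r le_rfl
        rw [hsplit] at hk
        simp only [List.headI_cons] at hk
        rw [hps] at hk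
        simpa using hk
      have hA : acSnips ('d'::'o'::'('::')'::r) = p0 :: acSnips r := by
        unfold acSnips
        rw [splitDont_doPrefix, hsplit]
        simp only [List.modifyHead_cons, List.flatMap_cons]
        rw [splitSpec_do_pre, hps]
        simp
      rw [hA]
      rw [altGo_do_cons, (altGo_state r.length r le_rfl [] []).2]
      simp [IH r hr, hp0]
    · by_cases hDONT : ['d','o','n','\'','t'] <+: s
      · obtain ⟨r, rfl⟩ := hDONT
        simp only [List.cons_append, List.nil_append] at hs ⊢
        have hr : r.length ≤ n := by simp at hs; omega
        have hA : acSnips ('d'::'o'::'n'::'\''::'t'::r) = acSnips r := by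
          unfold acSnips
          rw [splitSpec_dont_pre]
          simp only [List.flatMap_cons]
          rw [splitSpec_nil _ (by simp)]
          rfl
        rw [hA, altGo_dont_cons]
        exact IH r hr
      · cases s with
        | nil =>
          unfold acSnips
          rw [splitSpec_nil _ (by simp)]
          simp [splitSpec_nil _ (by simp : (['d','o','(',')'] : List Char) ≠ []), altGo_nil]
        | cons c r =>
          have hr : r.length ≤ n := by simp at hs; omega
          obtain ⟨h', t, hsplit⟩ : ∃ h' t, splitSpec ['d','o','n','\'','t'] r = h' :: t := by
            cases hx : splitSpec ['d','o','n','\'','t'] r with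
            | nil => exact absurd hx (splitSpec_ne_nil _ _)
            | cons a b => exact ⟨a, b, rfl⟩
          have hnp : ¬ ['d','o','(',')'] <+: (c :: h') := by
            have := not_do_prefix_head c r hDO
            rw [hsplit] at this
            simpa using this
          have hA : acSnips (c :: r) = acSnips r := by
            unfold acSnips
            rw [splitSpec_cons _ _ _ hDONT, hsplit]
            simp only [List.modifyHead_cons, List.flatMap_cons]
            rw [splitSpec_cons _ _ _ hnp, drop_one_modifyHead]
          have hB : altGo (c :: r) false [] [] = altGo r false [] [] := by
            rw [altGo_cons c r false [] [] hDO hDONT]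
            exact (altGo_state r.length r le_rfl [c] []).1
          rw [hA, hB]
          exact IH r hr

-- the inner Python split of a snippet, as splitSpec
lemma inner_split (seg : List Char) :
    (PySem.Str.split? (String.ofList seg) "do()").getD []
      = (splitSpec ['d','o','(',')'] seg).map String.ofList := by
  unfold PySem.Str.split? PySem.Chars.split?
  rw [String.toList_ofList, splitOn_eq _ _ (by simp)]
  simp

-- the foldl of port A collects exactly the flatMap of the dropped tails
lemma foldA (segs : List (List Char)) : ∀ acc : List String,
    List.foldl (fun acc snippet =>
      let do_snippet := (PySem.Str.split? snippet "do()").getD []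
      if do_snippet.length = 1 then acc else acc ++ do_snippet.drop 1) acc
      (segs.map String.ofList)
    = acc ++ (segs.flatMap (fun seg => (splitSpec ['d','o','(',')'] seg).drop 1)).map String.ofList := by
  induction segs with
  | nil => intro acc; simp
  | cons seg segs IH =>
    intro acc
    rw [List.map_cons, List.foldl_cons]
    have hstep : (let do_snippet := (PySem.Str.split? (String.ofList seg) "do()").getD []
        if do_snippet.length = 1 then acc else acc ++ do_snippet.drop 1)
        = acc ++ ((splitSpec ['d','o','(',')'] seg).drop 1).map String.ofList := by
      by_cases hl : (splitSpec ['d','o','(',')'] seg).length = 1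
      · have hdrop : (splitSpec ['d','o','(',')'] seg).drop 1 = [] :=
          List.drop_eq_nil_iff.mpr (by omega)
        simp [inner_split, hl, hdrop]
      · simp [inner_split, hl]
    rw [hstep, IH, List.flatMap_cons, List.map_append, List.append_assoc]

theorem find_do_snippets_spec : Claim_equal_find_do_snippets := by
  intro input _
  unfold Spec_find_do_snippets find_do_snippets find_do_snippets_alt
  have hsplit1 : PySem.Str.split? ("do()" ++ input) "don't"
      = some ((splitSpec ['d','o','n','\'','t'] (("do()" ++ input).toList)).map String.ofList) := by
    unfold PySem.Str.split? PySem.Chars.split?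
    rw [splitOn_eq _ _ (by simp [dontList])]
    simp [dontList]
  show (List.foldl (fun acc snippet =>
      let do_snippet := (PySem.Str.split? snippet "do()").getD []
      if do_snippet.length = 1 then acc else acc ++ do_snippet.drop 1) []
      ((PySem.Str.split? ("do()" ++ input) "don't").getD []))
    = altGo (("do()" ++ input).toList) false [] []
  rw [hsplit1]
  simp only [Option.getD_some]
  refine (foldA _ []).trans ?_
  rw [List.nil_append]
  exact acSnips_main (("do()" ++ input).toList).length _ le_rfl
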